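-- pv_equiv track=rewrite | github.com/mjhosseini/entgraph_eval | lemma_baseline/qa_utils.py | same_main_words
-- ===== SOURCE A (Python) =====
-- def same_main_words(p, q, prepositions):
--     ss_p = p[1:-1].replace(',', ' ').replace('.', ' ').split()
--     ss_q = q[1:-1].replace(',', ' ').replace('.', ' ').split()
--     s1 = set(ss_p)
--     s2 = set(ss_q)
--     nums = ['1', '2', '3']
--     for x in s1:
--         if x in prepositions or x in nums:
--             continue
--         if x not in s2:
--             return False
--
--     for x in s2:
--         if x in prepositions or x in nums:
--             continue
--         if x not in s1:
--             return False
--     return True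
-- ===== SOURCE B (Python) =====
-- def same_main_words(p, q, prepositions):
--     def words(s):
--         return set(s[1:-1].replace(',', ' ').replace('.', ' ').split())
--     mask = {}
--     for w in words(p):
--         mask[w] = 1
--     for w in words(q):
--         mask[w] = mask.get(w, 0) | 2
--     nums = ('1', '2', '3')
--     return all(m == 3 or w in prepositions or w in nums
--                for w, m in mask.items())
-- ===== Notes on version B (the rewrite author's own statement) =====
-- stated objective: alternative
-- what changed: Instead of two directional early-exit membership loops over the two word sets, B builds one merged dictionary mapping each word of either phrase to a presence bitmask (1=in p, 2=in q) and then checks once that every word not present in both (mask != 3) is a preposition or a numeral.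
import Mathlib
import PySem

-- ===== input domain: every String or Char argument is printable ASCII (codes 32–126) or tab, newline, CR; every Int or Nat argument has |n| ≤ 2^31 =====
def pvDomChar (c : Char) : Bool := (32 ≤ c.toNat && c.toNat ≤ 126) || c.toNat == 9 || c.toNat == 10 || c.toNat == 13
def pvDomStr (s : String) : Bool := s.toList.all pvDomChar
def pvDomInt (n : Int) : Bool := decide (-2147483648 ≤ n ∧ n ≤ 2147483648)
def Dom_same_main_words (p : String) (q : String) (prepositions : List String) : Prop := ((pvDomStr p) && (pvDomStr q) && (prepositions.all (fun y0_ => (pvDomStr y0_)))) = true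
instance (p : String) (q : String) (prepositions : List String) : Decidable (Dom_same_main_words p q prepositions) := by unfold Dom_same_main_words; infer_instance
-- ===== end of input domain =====

-- B replaces A's two directional early-exit membership loops with one merged dictionary
-- mapping each word to a presence bitmask (1 = in p, 2 = in q) checked in a single scan
-- (objective: alternative; return value only, no side effects in either).

-- ===== PORT A =====
-- p[1:-1].replace(',', ' ').replace('.', ' ').split()  (shared tokenisation text of both Pythons)
def smwClean (s : String) : List String :=
  PySem.Str.split₀ (PySem.Str.replace (PySem.Str.replace (PySem.Str.slice s (some 1) (some (-1))) "," " ") "." " ")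

-- one of A's 'for x in sX: … return False' loops (early return False = result false)
def smwLoop (xs : List String) (other : PySem.Set String) (prepositions : List String) : Bool :=
  match xs with
  | [] => true
  | x :: rest =>
    if prepositions.contains x || (["1", "2", "3"] : List String).contains x then
      smwLoop rest other prepositions
    else if !(PySem.Set.contains other x) then false
    else smwLoop rest other prepositions

def same_main_words (p : String) (q : String) (prepositions : List String) : Bool :=
  let s1 : PySem.Set String := PySem.Set.ofList (smwClean p)
  let s2 : PySem.Set String := PySem.Set.ofList (smwClean q)
  smwLoop s1 s2 prepositions && smwLoop s2 s1 prepositions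

-- ===== PORT B =====
-- words(s) = set of the cleaned tokens
def smwWords (s : String) : PySem.Set String :=
  PySem.Set.ofList (smwClean s)

def same_main_words_alt (p : String) (q : String) (prepositions : List String) : Bool :=
  -- for w in words(p): mask[w] = 1
  let mask1 : PySem.Dict String Int :=
    (smwWords p).foldl (fun d w => d.insert w 1) PySem.Dict.empty
  -- for w in words(q): mask[w] = mask.get(w, 0) | 2
  let mask2 : PySem.Dict String Int :=
    (smwWords q).foldl (fun d w => d.insert w (PySem.Int.bor (d.getD w 0) 2)) mask1
  -- all(m == 3 or w in prepositions or w in nums for w, m in mask.items())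
  mask2.items.all (fun wm =>
    wm.2 == 3 || prepositions.contains wm.1 || (["1", "2", "3"] : List String).contains wm.1)

-- ===== PRECONDITION & SPEC =====
def Spec_same_main_words (p : String) (q : String) (prepositions : List String) (out : Bool) : Prop := out = same_main_words_alt p q prepositions
instance (p : String) (q : String) (prepositions : List String) (out : Bool) : Decidable (Spec_same_main_words p q prepositions out) := by unfold Spec_same_main_words; infer_instance

-- ===== CLAIM (what is proved, stated in full; the proofs are below) =====
def Claim_equal_same_main_words : Prop := ∀ (p : String) (q : String) (prepositions : List String), Dom_same_main_words p q prepositions → Spec_same_main_words p q prepositions (same_main_words p q prepositions)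

-- ===== LEMMAS AND PROOFS =====

-- x is "significant" (not a preposition, not a numeral)
def smwKeep (prepositions : List String) (x : String) : Bool :=
  !(prepositions.contains x || (["1", "2", "3"] : List String).contains x)

theorem smwWords_def (s : String) : smwWords s = PySem.Set.ofList (smwClean s) := rfl

theorem smwWords_nodup (s : String) : (smwWords s).Nodup := PySem.Set.nodup_ofList _

-- characterisation of one directional loop of A
theorem smwLoop_eq_true_iff (xs : List String) (other : PySem.Set String) (preps : List String) :
    smwLoop xs other preps = true ↔
      ∀ x ∈ xs, smwKeep preps x = true → x ∈ other := by
  induction xs with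
  | nil => simp [smwLoop]
  | cons x rest ih =>
    simp only [smwLoop, List.mem_cons]
    by_cases h : (preps.contains x || (["1", "2", "3"] : List String).contains x) = true
    · rw [if_pos h, ih]
      have hk : smwKeep preps x = false := by unfold smwKeep; rw [h]; rfl
      constructor
      · intro H y hy hky
        rcases hy with rfl | hy
        · rw [hk] at hky; cases hky
        · exact H y hy hky
      · intro H y hy; exact H y (Or.inr hy)
    · rw [if_neg h]
      have hf : (preps.contains x || (["1", "2", "3"] : List String).contains x) = false :=
        Bool.eq_false_iff.mpr h
      have hkx : smwKeep preps x = true := by unfold smwKeep; rw [hf]; rfl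
      cases hc : PySem.Set.contains other x with
      | true =>
        have hxm : x ∈ other := by simpa using hc
        rw [if_neg (by simp), ih]
        constructor
        · intro H y hy hky
          rcases hy with rfl | hy
          · exact hxm
          · exact H y hy hky
        · intro H y hy; exact H y (Or.inr hy)
      | false =>
        rw [if_pos (by simp)]
        constructor
        · intro H; exact absurd H (by simp)
        · intro H
          have hxm : x ∈ other := H x (Or.inl rfl) hkx
          have : PySem.Set.contains other x = true := by simpa using hxm
          rw [hc] at this; cases this
 
-- first loop of B: overwrite with constant 1
theorem smw_fold1_get? (ws : List String) (d : PySem.Dict String Int) (x : String) :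
    (ws.foldl (fun d w => d.insert w (1 : Int)) d).get? x
      = if x ∈ ws then some 1 else d.get? x := by
  induction ws generalizing d with
  | nil => simp
  | cons w rest ih =>
    simp only [List.foldl_cons, ih, List.mem_cons]
    by_cases hx : x ∈ rest
    · simp [hx]
    · rw [if_neg hx, PySem.Dict.get?_insert]
      by_cases he : x = w <;> simp [he, hx]

-- second loop of B: OR in the bit 2, over a duplicate-free word list
theorem smw_fold2_get? (ws : List String) (hnd : ws.Nodup) (d : PySem.Dict String Int) (x : String) :
    (ws.foldl (fun d w => d.insert w (PySem.Int.bor (d.getD w 0) 2)) d).get? x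
      = if x ∈ ws then some (PySem.Int.bor (d.getD x 0) 2) else d.get? x := by
  induction ws generalizing d with
  | nil => simp
  | cons w rest ih =>
    rcases List.nodup_cons.mp hnd with ⟨hw, hrest⟩
    simp only [List.foldl_cons, ih hrest, List.mem_cons]
    by_cases hx : x ∈ rest
    · have hne : x ≠ w := fun he => hw (he ▸ hx)
      rw [if_pos (Or.inr hx), if_pos hx, PySem.Dict.getD_insert, if_neg hne]
    · rw [if_neg hx, PySem.Dict.get?_insert]
      by_cases he : x = w <;> simp [he, hx]

-- the merged mask dictionary's lookup, in closed form
theorem smw_mask_get? (p q : String) (x : String) :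
    ((smwWords q).foldl (fun d w => d.insert w (PySem.Int.bor (d.getD w 0) 2))
        ((smwWords p).foldl (fun d w => d.insert w (1 : Int)) PySem.Dict.empty)).get? x
      = if x ∈ smwWords q then
          some (if x ∈ smwWords p then 3 else 2)
        else if x ∈ smwWords p then some 1 else none := by
  rw [smw_fold2_get? (smwWords q) (smwWords_nodup q) _ x]
  have h1 := smw_fold1_get? (smwWords p) PySem.Dict.empty x
  by_cases hq : x ∈ smwWords q
  · rw [if_pos hq, if_pos hq, PySem.Dict.getD_eq_get?_getD, h1]
    by_cases hp : x ∈ smwWords p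
    · rw [if_pos hp, if_pos hp]; simp; decide
    · rw [if_neg hp, if_neg hp]; simp [PySem.Dict.get?_empty]; decide
  · rw [if_neg hq, if_neg hq, h1, PySem.Dict.get?_empty]

-- keys of the merged mask stay duplicate-free
theorem smw_mask_keys_nodup (p q : String) :
    ((smwWords q).foldl (fun d w => d.insert w (PySem.Int.bor (d.getD w 0) 2))
        ((smwWords p).foldl (fun d w => d.insert w (1 : Int)) PySem.Dict.empty)).keys.Nodup :=
  PySem.Dict.nodup_keys_foldl_insert _ _ _
    (PySem.Dict.nodup_keys_foldl_insert _ _ _ PySem.Dict.nodup_keys_empty)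

-- main equivalence
theorem smw_main (p q : String) (preps : List String) :
    same_main_words p q preps = same_main_words_alt p q preps := by
  unfold same_main_words same_main_words_alt
  rw [Bool.eq_iff_iff, Bool.and_eq_true, smwLoop_eq_true_iff, smwLoop_eq_true_iff,
      List.all_eq_true]
  rw [← smwWords_def, ← smwWords_def]
  set mask := (smwWords q).foldl (fun d w => d.insert w (PySem.Int.bor (d.getD w 0) 2))
      ((smwWords p).foldl (fun d w => d.insert w (1 : Int)) PySem.Dict.empty) with hmask
  have hval : ∀ x (v : Int), ((x, v) ∈ mask.items ↔ mask.get? x = some v) := by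
    intro x v
    exact Iff.symm (PySem.Dict.get?_eq_some_iff_mem_items mask x v (smw_mask_keys_nodup p q))
  constructor
  · rintro ⟨h1, h2⟩ ⟨x, v⟩ hxv
    have hv := (hval x v).mp hxv
    rw [smw_mask_get? p q x] at hv
    by_cases hk : smwKeep preps x = true
    · -- significant word: it is in both phrases, so v = 3
      by_cases hq : x ∈ smwWords q
      · have hp : x ∈ smwWords p := h2 x hq hk
        rw [if_pos hq, if_pos hp] at hv
        have hv3 : v = 3 := by simpa using hv.symm
        simp [hv3]
      · by_cases hp : x ∈ smwWords p
        · exact absurd (h1 x hp hk) hq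
        · rw [if_neg hq, if_neg hp] at hv; cases hv
    · -- insignificant word: the right disjuncts hold
      have hor : (preps.contains x || (["1", "2", "3"] : List String).contains x) = true := by
        cases hcc : (preps.contains x || (["1", "2", "3"] : List String).contains x) with
        | true => rfl
        | false => exact absurd (by unfold smwKeep; rw [hcc]; rfl) hk
      show ((v == 3) || preps.contains x || (["1", "2", "3"] : List String).contains x) = true
      rw [Bool.or_assoc, hor, Bool.or_true]
  · intro H
    have key : ∀ x, smwKeep preps x = true → x ∈ smwWords p ∨ x ∈ smwWords q →
        (x ∈ smwWords p ∧ x ∈ smwWords q) := by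
      intro x hk hmem
      have hv : ∃ v, mask.get? x = some v := by
        rw [smw_mask_get? p q x]
        rcases hmem with hp | hq
        · by_cases hq : x ∈ smwWords q <;> simp [hp, hq]
        · simp [hq]
      rcases hv with ⟨v, hv⟩
      have hP := H (x, v) ((hval x v).mpr hv)
      have hor : (preps.contains x || (["1", "2", "3"] : List String).contains x) = false := by
        cases hcc : (preps.contains x || (["1", "2", "3"] : List String).contains x) with
        | false => rfl
        | true => unfold smwKeep at hk; rw [hcc] at hk; simp at hk
      rcases Bool.or_eq_false_iff.mp hor with ⟨hc1, hc2⟩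
      have hv3 : v = 3 := by
        simp only [Bool.or_eq_true_iff, beq_iff_eq] at hP
        rcases hP with (h3 | hc) | hc
        · exact h3
        · rw [hc] at hc1; exact Bool.noConfusion hc1
        · rw [hc] at hc2; exact Bool.noConfusion hc2
      rw [smw_mask_get? p q x, hv3] at hv
      by_cases hq : x ∈ smwWords q
      · by_cases hp : x ∈ smwWords p
        · exact ⟨hp, hq⟩
        · rw [if_pos hq, if_neg hp] at hv; simp at hv
      · by_cases hp : x ∈ smwWords p
        · rw [if_neg hq, if_pos hp] at hv; simp at hv
        · rw [if_neg hq, if_neg hp] at hv; cases hv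
    exact ⟨fun x hx hk => (key x hk (Or.inl hx)).2, fun x hx hk => (key x hk (Or.inr hx)).1⟩

-- ===== VERDICT (by name: the statement is the Claim_ definition above) =====
theorem same_main_words_spec : Claim_equal_same_main_words := by
  intro p q preps _
  unfold Spec_same_main_words
  exact smw_main p q preps
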